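-- pv_equiv track=rewrite | github.com/brandonbunce/InstagramDownloadMetadataFixer | main.py | idmf_correct_media_dates
-- ===== SOURCE A (Python) =====
-- from collections import Counter
--
-- def idmf_correct_media_dates(media_dates_list):
--     date_counts = Counter(media_dates_list)
--     corrected_image_dates_list = []
--
--     for date in media_dates_list:
--         if date_counts[date] > 1:
--             #Append 00X based on the occurrence
--             occurrence = date_counts[date] - 1
--             new_date = f"{date}_{occurrence:03d}"
--             date_counts[date] -= 1
--         else:
--             new_date = date
--
--         corrected_image_dates_list.append(new_date)
--     return corrected_image_dates_list
-- ===== SOURCE B (Python) =====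
-- def idmf_correct_media_dates(media_dates_list):
--     # Stateless: each element's suffix is simply the number of later equal elements.
--     return [
--         f"{d}_{k:03d}" if (k := media_dates_list[i + 1:].count(d)) > 0 else d
--         for i, d in enumerate(media_dates_list)
--     ]
-- ===== Notes on version B (the rewrite author's own statement) =====
-- stated objective: simpler
-- what changed: Replaces the Counter pre-pass plus stateful forward decrementing loop by one stateless comprehension in which each element's suffix is the count of equal elements after it; no dict or mutable counter at all.
import Mathlib
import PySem

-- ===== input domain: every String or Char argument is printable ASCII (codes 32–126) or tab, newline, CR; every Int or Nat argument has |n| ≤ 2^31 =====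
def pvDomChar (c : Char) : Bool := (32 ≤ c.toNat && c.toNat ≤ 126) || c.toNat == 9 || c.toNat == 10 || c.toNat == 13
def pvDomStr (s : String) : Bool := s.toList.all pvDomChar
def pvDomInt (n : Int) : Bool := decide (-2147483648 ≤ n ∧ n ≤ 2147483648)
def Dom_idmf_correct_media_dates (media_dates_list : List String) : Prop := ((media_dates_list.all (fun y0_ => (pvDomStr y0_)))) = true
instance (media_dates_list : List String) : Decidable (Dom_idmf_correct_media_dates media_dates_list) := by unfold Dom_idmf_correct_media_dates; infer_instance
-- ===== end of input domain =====

-- B replaces A's Counter pre-pass + stateful decrementing loop by a stateless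
-- comprehension (suffix = number of later equal elements); objective: simpler.
-- B is O(n^2) vs A's O(n); return values proved equal on all inputs.

-- f"{date}_{occ:03d}" — exact for occ ≥ 0 (always occ ≥ 1 here): str(occ) zero-padded to width 3
def pvFmtDup (date : String) (occ : Int) : String :=
  date ++ "_" ++ PySem.Str.zfill (PySem.Int.toStr occ) 3

-- ===== PORT A =====
def idmf_correct_media_dates (media_dates_list : List String) : List String :=
  let date_counts := PySem.Dict.counter media_dates_list
  (media_dates_list.foldl
    (fun (st : PySem.Dict String Int × List String) date =>
      if st.1.getD date 0 > 1 then
        let occurrence := st.1.getD date 0 - 1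
        (st.1.insert date (st.1.getD date 0 - 1), st.2 ++ [pvFmtDup date occurrence])
      else
        (st.1, st.2 ++ [date]))
    (date_counts, [])).2

-- ===== PORT B =====
def idmf_correct_media_dates_alt (media_dates_list : List String) : List String :=
  (PySem.List.enumerate media_dates_list).map (fun p =>
    let k := PySem.List.count (PySem.List.slice media_dates_list (some (p.1 + 1)) none) p.2
    if k > 0 then pvFmtDup p.2 (k : Int) else p.2)

-- ===== PRECONDITION & SPEC =====
def Spec_idmf_correct_media_dates (media_dates_list : List String) (out : List String) : Prop := out = idmf_correct_media_dates_alt media_dates_list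
instance (media_dates_list : List String) (out : List String) : Decidable (Spec_idmf_correct_media_dates media_dates_list out) := by unfold Spec_idmf_correct_media_dates; infer_instance

-- ===== CLAIM (what is proved, stated in full; the proofs are below) =====
def Claim_equal_idmf_correct_media_dates : Prop := ∀ (media_dates_list : List String), Dom_idmf_correct_media_dates media_dates_list → Spec_idmf_correct_media_dates media_dates_list (idmf_correct_media_dates media_dates_list)

-- ===== LEMMAS AND PROOFS =====

-- common specification: position w with k later equal elements gets suffix k
def pvEmit (d : String) (k : Int) : String := if k > 0 then pvFmtDup d k else d

def pvSpecList : List String → List String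
  | [] => []
  | w :: ws => pvEmit w (ws.count w : Int) :: pvSpecList ws

theorem pvEmit_pos (d : String) {k : Int} (h : k > 0) : pvEmit d k = pvFmtDup d k := if_pos h

theorem pvEmit_nonpos (d : String) {k : Int} (h : ¬ k > 0) : pvEmit d k = d := if_neg h

-- A's loop: invariant — the counter holds, for each date still to be processed, its count in the rest
theorem pvA_loop (rest : List String) (c : PySem.Dict String Int) (acc : List String)
    (hinv : ∀ d ∈ rest, c.getD d 0 = (rest.count d : Int)) :
    (rest.foldl
      (fun (st : PySem.Dict String Int × List String) date =>
        if st.1.getD date 0 > 1 then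
          (st.1.insert date (st.1.getD date 0 - 1), st.2 ++ [pvFmtDup date (st.1.getD date 0 - 1)])
        else
          (st.1, st.2 ++ [date]))
      (c, acc)).2 = acc ++ pvSpecList rest := by
  induction rest generalizing c acc with
  | nil => simp [pvSpecList]
  | cons x ws ih =>
    have hx : c.getD x 0 = (ws.count x : Int) + 1 := by
      have := hinv x (by simp)
      simpa [List.count_cons] using this
    by_cases h0 : ws.count x = 0
    · have hnot : ¬ c.getD x 0 > 1 := by omega
      have hxmem : x ∉ ws := by simpa using List.count_eq_zero.mp h0
      simp only [List.foldl_cons, hnot, if_false]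
      rw [ih c (acc ++ [x]) ?_]
      · have hnp : ¬ ((ws.count x : Int) > 0) := by
          simp [h0]
        simp only [pvSpecList, pvEmit_nonpos _ hnp]
        simp
      · intro d hd
        have hne : d ≠ x := fun he => hxmem (he ▸ hd)
        have := hinv d (by simp [hd])
        simpa [List.count_cons, Ne.symm hne] using this
    · have hgt : c.getD x 0 > 1 := by omega
      simp only [List.foldl_cons, hgt, if_true]
      rw [ih (c.insert x (c.getD x 0 - 1)) _ ?_]
      · have hk : c.getD x 0 - 1 = (ws.count x : Int) := by omega
        have hp : ((ws.count x : Int) > 0) := by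
          exact_mod_cast Nat.pos_of_ne_zero h0
        simp only [pvSpecList, hk, pvEmit_pos _ hp]
        simp
      · intro d hd
        by_cases hdx : d = x
        · subst hdx
          rw [PySem.Dict.getD_insert_self]
          omega
        · rw [PySem.Dict.getD_insert_of_ne _ _ _ hdx]
          have := hinv d (by simp [hd])
          simpa [List.count_cons, Ne.symm hdx] using this

-- B's comprehension over any suffix ws of the full list pre ++ ws, enumerated from pre.length
theorem pvB_go (ws pre : List String) :
    (PySem.List.enumerate ws (pre.length : Int)).map (fun p =>
      let k := PySem.List.count (PySem.List.slice (pre ++ ws) (some (p.1 + 1)) none) p.2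
      if k > 0 then pvFmtDup p.2 (k : Int) else p.2)
      = pvSpecList ws := by
  induction ws generalizing pre with
  | nil => simp [PySem.List.enumerate_nil, pvSpecList]
  | cons w ws ih =>
    rw [PySem.List.enumerate_cons]
    simp only [List.map_cons]
    have hdrop : PySem.List.slice (pre ++ w :: ws) (some ((pre.length : Int) + 1)) none = ws := by
      have : ((pre.length : Int) + 1) = ((pre.length + 1 : Nat) : Int) := by push_cast; ring
      rw [this, PySem.List.slice_from_natCast]
      simp
    have htail : ((pre.length : Int) + 1) = (((pre ++ [w]).length : Nat) : Int) := by
      simp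
    have h2 : pre ++ w :: ws = (pre ++ [w]) ++ ws := by simp
    rw [hdrop]
    congr 1
    · show (if PySem.List.count ws w > 0 then pvFmtDup w (PySem.List.count ws w : Int) else w)
          = pvEmit w (ws.count w : Int)
      simp only [PySem.List.count_eq, pvEmit]
      by_cases h : ws.count w > 0
      · have h' : ((ws.count w : Int) > 0) := by exact_mod_cast h
        rw [if_pos h, if_pos h']
      · have h' : ¬ ((ws.count w : Int) > 0) := by exact_mod_cast h
        rw [if_neg h, if_neg h']
    · rw [htail, h2]
      exact ih (pre ++ [w])

-- ===== VERDICT (by name: the statement is the Claim_ definition above) =====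
theorem idmf_correct_media_dates_spec : Claim_equal_idmf_correct_media_dates := by
  intro xs _
  show idmf_correct_media_dates xs = idmf_correct_media_dates_alt xs
  have hA : idmf_correct_media_dates xs = pvSpecList xs := by
    unfold idmf_correct_media_dates
    exact pvA_loop xs (PySem.Dict.counter xs) []
      (fun d _ => PySem.Dict.getD_counter xs d)
  have hB : idmf_correct_media_dates_alt xs = pvSpecList xs := by
    unfold idmf_correct_media_dates_alt
    have := pvB_go xs []
    simpa using this
  rw [hA, hB]
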